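-- pv_equiv track=rewrite | github.com/pradheap/dsa-challenges | challenges/string/source/string_matching.py | rabin_karp_string_matching
-- ===== SOURCE A (Python) =====
-- def hash_func(s):
--     prime_num = 7
--     hash_value = 0
--     for ind, char in enumerate(s):
--         hash_value += ord(char) * pow(prime_num, ind)
--     return hash_value
--
-- def _rolling_hash(prev_hash, prev_char, next_char, length):
--     prime_num = 7
--     hash_value = (prev_hash - ord(prev_char)) // prime_num
--     return hash_value + ord(next_char) * pow(prime_num, length - 1)
--
-- def rabin_karp_string_matching(haystack, needle):
--     t_length = len(haystack)
--     p_length = len(needle)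
--     p_hash = hash_func(needle)
--     t_hash = hash_func(haystack[0:len(needle)])
--     if p_hash == t_hash:
--         return 0
--     for i in range(1, t_length - p_length + 1):
--         t_hash = _rolling_hash(t_hash, haystack[i-1], haystack[i + p_length - 1], p_length)
--         if p_hash == t_hash:
--             return i
-- ===== SOURCE B (Python) =====
-- def rabin_karp_string_matching(haystack, needle):
--     # Recompute each window's polynomial hash directly (Horner from the back)
--     # instead of maintaining a rolling hash.
--     def win_hash(s):
--         h = 0
--         for ch in reversed(s):
--             h = h * 7 + ord(ch)
--         return h
--
--     p = len(needle)
--     target = win_hash(needle)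
--     if win_hash(haystack[:p]) == target:
--         return 0
--     for i in range(1, len(haystack) - p + 1):
--         if win_hash(haystack[i:i + p]) == target:
--             return i
--     return None
-- ===== Notes on version B (the rewrite author's own statement) =====
-- stated objective: simpler
-- what changed: Replaced the incremental _rolling_hash maintenance (exact-division rolling update plus a pow(7, length-1) call per shift) with a direct recomputation of each candidate window's polynomial hash via Horner's rule from the back, removing the rolling-hash helper and the carried hash state.
import Mathlib
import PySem

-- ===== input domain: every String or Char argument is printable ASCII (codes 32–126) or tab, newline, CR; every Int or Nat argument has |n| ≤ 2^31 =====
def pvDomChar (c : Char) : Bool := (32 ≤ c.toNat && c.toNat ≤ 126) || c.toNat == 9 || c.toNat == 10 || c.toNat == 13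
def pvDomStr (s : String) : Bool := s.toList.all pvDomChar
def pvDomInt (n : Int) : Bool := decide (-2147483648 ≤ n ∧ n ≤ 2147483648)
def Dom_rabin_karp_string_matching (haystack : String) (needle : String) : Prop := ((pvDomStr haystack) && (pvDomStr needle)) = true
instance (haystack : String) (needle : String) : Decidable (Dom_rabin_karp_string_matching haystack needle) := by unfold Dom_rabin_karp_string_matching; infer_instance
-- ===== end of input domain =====

-- B replaces A's incremental rolling-hash window maintenance with a direct recomputation of
-- each window's polynomial hash via Horner's rule from the back (simpler: no carried hash state).

-- ===== PORT A =====
-- ord(char) on code points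
def pvOrd (c : Char) : Int := (c.toNat : Int)

-- hash_func: enumerate loop accumulating ord(char) * 7**ind
def hash_func (s : List Char) : Int :=
  (PySem.List.enumerate s).foldl (fun h p => h + pvOrd p.2 * 7 ^ p.1.toNat) 0

-- _rolling_hash (length - 1 ≥ 0 whenever the Python reaches this call, so the Nat exponent is exact there)
def rolling_hash (prev_hash : Int) (prev_char : Char) (next_char : Char) (length : Int) : Int :=
  PySem.Int.floordiv (prev_hash - pvOrd prev_char) 7 + pvOrd next_char * 7 ^ (length - 1).toNat

-- the for-loop of A, carrying t_hash; both haystack indexings are in range whenever the loop runs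
def rkLoopA (hay : List Char) (p_hash : Int) (p_length : Int) : List Int → Int → Option Int
  | [], _ => none
  | i :: rest, t_hash =>
    let t_hash' := rolling_hash t_hash (PySem.List.pyGetD hay (i - 1) 'a')
        (PySem.List.pyGetD hay (i + p_length - 1) 'a') p_length
    if p_hash = t_hash' then some i else rkLoopA hay p_hash p_length rest t_hash'

def rabin_karp_string_matching (haystack : String) (needle : String) : Option Int :=
  let hay := haystack.toList
  let t_length : Int := hay.length
  let p_length : Int := needle.toList.length
  let p_hash := hash_func needle.toList
  let t_hash := hash_func (PySem.List.slice hay (some 0) (some p_length))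
  if p_hash = t_hash then some 0
  else rkLoopA hay p_hash p_length (PySem.List.pyRange 1 (t_length - p_length + 1) 1) t_hash

-- ===== PORT B =====
-- win_hash: Horner's rule over the reversed window
def win_hash (s : List Char) : Int :=
  s.reverse.foldl (fun h c => h * 7 + pvOrd c) 0

def rkLoopB (hay : List Char) (target : Int) (p : Int) : List Int → Option Int
  | [] => none
  | i :: rest =>
    if win_hash (PySem.List.slice hay (some i) (some (i + p))) = target then some i
    else rkLoopB hay target p rest

def rabin_karp_string_matching_alt (haystack : String) (needle : String) : Option Int :=
  let hay := haystack.toList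
  let p : Int := needle.toList.length
  let target := win_hash needle.toList
  if win_hash (PySem.List.slice hay (some 0) (some p)) = target then some 0
  else rkLoopB hay target p (PySem.List.pyRange 1 ((hay.length : Int) - p + 1) 1)

-- ===== PRECONDITION & SPEC =====
def Spec_rabin_karp_string_matching (haystack : String) (needle : String) (out : Option Int) : Prop := out = rabin_karp_string_matching_alt haystack needle
instance (haystack : String) (needle : String) (out : Option Int) : Decidable (Spec_rabin_karp_string_matching haystack needle out) := by unfold Spec_rabin_karp_string_matching; infer_instance

-- ===== CLAIM (what is proved, stated in full; the proofs are below) =====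
def Claim_equal_rabin_karp_string_matching : Prop := ∀ (haystack : String) (needle : String), Dom_rabin_karp_string_matching haystack needle → Spec_rabin_karp_string_matching haystack needle (rabin_karp_string_matching haystack needle)

-- ===== LEMMAS AND PROOFS =====

theorem foldl_horner (l : List Char) (a : Int) :
    l.foldl (fun h c => h * 7 + pvOrd c) a
      = a * 7 ^ l.length + l.foldl (fun h c => h * 7 + pvOrd c) 0 := by
  induction l generalizing a with
  | nil => simp
  | cons c l ih =>
    simp only [List.foldl_cons, List.length_cons]
    rw [ih (a * 7 + pvOrd c), ih (0 * 7 + pvOrd c)]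
    ring

theorem win_hash_cons (c : Char) (s : List Char) :
    win_hash (c :: s) = 7 * win_hash s + pvOrd c := by
  unfold win_hash
  simp only [List.reverse_cons, List.foldl_append, List.foldl_cons, List.foldl_nil]
  ring

theorem win_hash_append (s : List Char) (c : Char) :
    win_hash (s ++ [c]) = win_hash s + pvOrd c * 7 ^ s.length := by
  unfold win_hash
  simp only [List.reverse_append, List.reverse_singleton, List.singleton_append,
    List.foldl_cons]
  rw [foldl_horner]
  simp only [List.length_reverse, zero_mul, zero_add, List.foldl_reverse]
  ring

theorem hash_aux (s : List Char) (k : Nat) (a : Int) :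
    (PySem.List.enumerate s (k : Int)).foldl (fun h p => h + pvOrd p.2 * 7 ^ p.1.toNat) a
      = a + 7 ^ k * win_hash s := by
  induction s generalizing k a with
  | nil => simp [PySem.List.enumerate_nil, win_hash]
  | cons c s ih =>
    rw [PySem.List.enumerate_cons, List.foldl_cons]
    have h1 : (k : Int) + 1 = ((k + 1 : Nat) : Int) := by push_cast; ring
    rw [h1, ih]
    rw [win_hash_cons]
    simp only [Int.toNat_natCast]
    ring

theorem hash_eq_win (s : List Char) : hash_func s = win_hash s := by
  have := hash_aux s 0 0
  simpa [hash_func] using this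

theorem rolling_step (w : List Char) (c d : Char) :
    rolling_hash (win_hash (c :: w)) c d ((w.length : Int) + 1) = win_hash (w ++ [d]) := by
  unfold rolling_hash
  rw [win_hash_cons, win_hash_append]
  have h1 : 7 * win_hash w + pvOrd c - pvOrd c = 7 * win_hash w := by ring
  rw [h1, PySem.Int.floordiv_eq_ediv_of_pos (by norm_num), Int.mul_ediv_cancel_left _ (by norm_num)]
  have h2 : ((w.length : Int) + 1 - 1).toNat = w.length := by omega
  rw [h2]

theorem wnd_cons (hay : List Char) (j pN : Nat) (hp : 1 ≤ pN) (h : j + pN ≤ hay.length) :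
    (hay.drop j).take pN = hay[j]'(by omega) :: ((hay.drop (j+1)).take (pN-1)) := by
  obtain ⟨q, rfl⟩ : ∃ q, pN = q + 1 := ⟨pN - 1, by omega⟩
  rw [List.drop_eq_getElem_cons (by omega), List.take_succ_cons]
  simp

theorem wnd_snoc (hay : List Char) (j pN : Nat) (hp : 1 ≤ pN) (h : j + 1 + pN ≤ hay.length) :
    (hay.drop (j+1)).take pN
      = (hay.drop (j+1)).take (pN-1) ++ [hay[j + pN]'(by omega)] := by
  obtain ⟨q, rfl⟩ : ∃ q, pN = q + 1 := ⟨pN - 1, by omega⟩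
  rw [List.take_add_one]
  congr 1
  rw [List.getElem?_drop]
  have h2 : j + 1 + q = j + (q + 1) := by omega
  rw [h2, List.getElem?_eq_getElem (by omega)]
  simp

theorem wnd_len (hay : List Char) (j pN : Nat) (h : j + pN ≤ hay.length) :
    ((hay.drop j).take pN).length = pN := by
  simp; omega

theorem loop_eq (hay : List Char) (ph : Int) (pN : Nat) (hp : 1 ≤ pN)
    (m : Nat) : ∀ (i : Int), 1 ≤ i →
    i + m = (hay.length : Int) - pN + 1 →
    rkLoopA hay ph pN (PySem.List.pyRange i ((hay.length : Int) - pN + 1) 1)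
      (win_hash ((hay.drop (i - 1).toNat).take pN)) =
    rkLoopB hay ph pN (PySem.List.pyRange i ((hay.length : Int) - pN + 1) 1) := by
  induction m with
  | zero =>
    intro i hi hm
    rw [PySem.List.pyRange_one_eq_nil (by omega)]
    rfl
  | succ m ih =>
    intro i hi hm
    obtain ⟨jn, rfl⟩ : ∃ jn : Nat, i = (jn : Int) + 1 := ⟨(i - 1).toNat, by omega⟩
    have hm' : jn + 1 + pN ≤ hay.length := by push_cast at hm; omega
    rw [PySem.List.pyRange_one_cons (by omega)]
    have e1 : ((jn : Int) + 1 - 1) = ((jn : Nat) : Int) := by ring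
    have e2 : ((jn : Int) + 1 + (pN : Int) - 1) = (((jn + pN : Nat)) : Int) := by push_cast; ring
    have hc1 : PySem.List.pyGetD hay ((jn : Int) + 1 - 1) 'a' = hay[jn]'(by omega) := by
      rw [e1, PySem.List.pyGetD_natCast, List.getD_eq_getElem _ _ (by omega)]
    have hc2 : PySem.List.pyGetD hay ((jn : Int) + 1 + (pN : Int) - 1) 'a' = hay[jn + pN]'(by omega) := by
      rw [e2, PySem.List.pyGetD_natCast, List.getD_eq_getElem _ _ (by omega)]
    have hlen : (((hay.drop (jn+1)).take (pN-1)).length : Int) + 1 = (pN : Int) := by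
      rw [wnd_len hay (jn+1) (pN-1) (by omega)]; omega
    have hroll : rolling_hash (win_hash ((hay.drop jn).take pN)) (PySem.List.pyGetD hay ((jn : Int) + 1 - 1) 'a')
        (PySem.List.pyGetD hay ((jn : Int) + 1 + (pN : Int) - 1) 'a') (pN : Int)
        = win_hash ((hay.drop (jn+1)).take pN) := by
      rw [hc1, hc2, wnd_cons hay jn pN hp (by omega), ← hlen, rolling_step,
        ← wnd_snoc hay jn pN hp hm']
    have hslice : PySem.List.slice hay (some ((jn : Int) + 1)) (some ((jn : Int) + 1 + (pN : Int)))
        = (hay.drop (jn+1)).take pN := by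
      rw [PySem.List.slice_toNat _ (by omega) (by omega)]
      congr 1
      omega
    simp only [rkLoopA, rkLoopB]
    rw [show (((jn : Int) + 1 - 1).toNat) = jn by omega, hroll, hslice]
    by_cases hEq : ph = win_hash ((hay.drop (jn+1)).take pN)
    · rw [if_pos hEq, if_pos hEq.symm]
    · rw [if_neg hEq, if_neg (fun h => hEq h.symm)]
      have hwin : (hay.drop (jn+1)).take pN = (hay.drop ((jn : Int) + 1 + 1 - 1).toNat).take pN := by
        congr 2
        omega
      rw [hwin]
      exact ih ((jn : Int) + 1 + 1) (by omega) (by push_cast at hm ⊢; omega)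

theorem main (haystack needle : String) :
    rabin_karp_string_matching haystack needle = rabin_karp_string_matching_alt haystack needle := by
  unfold rabin_karp_string_matching rabin_karp_string_matching_alt
  simp only
  set hay := haystack.toList with hhay
  set nee := needle.toList with hnee
  set pN := nee.length with hpN
  have hslice0 : PySem.List.slice hay (some 0) (some (pN : Int)) = hay.take pN := by
    rw [PySem.List.slice_zero_start, PySem.List.slice_to _ (by omega)]
    simp
  rw [hslice0, hash_eq_win, hash_eq_win]
  by_cases h0 : win_hash nee = win_hash (hay.take pN)
  · rw [if_pos h0, if_pos h0.symm]
  · rw [if_neg h0, if_neg (fun h => h0 h.symm)]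
    have hp : 1 ≤ pN := by
      by_contra hc
      have : pN = 0 := by omega
      apply h0
      have hn : nee = [] := List.length_eq_zero_iff.mp (by omega)
      rw [hn, this]
      simp
    by_cases ht : pN ≤ hay.length
    · have := loop_eq hay (win_hash nee) pN hp (hay.length - pN) 1 (by omega)
        (by omega)
      simpa using this
    · rw [PySem.List.pyRange_one_eq_nil (by omega)]
      rfl

-- ===== VERDICT (by name: the statement is the Claim_ definition above) =====
theorem rabin_karp_string_matching_spec : Claim_equal_rabin_karp_string_matching := by
  intro haystack needle _
  unfold Spec_rabin_karp_string_matching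
  exact main haystack needle
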